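-- pv_equiv track=rewrite | github.com/m0squit/orchestrator | preprocessor.py | _get_positive_min_index
-- ===== SOURCE A (Python) =====
-- from typing import Dict, List, Tuple, Set, Union, Optional
--
-- def _get_positive_min_index(array: List[int]) -> Optional[int]:
--     if len(array) == 0:
--         return None
--     i = 0
--     while array[i] <= 0:
--         i += 1
--         if i == len(array):
--             return None
--     pos_min = array[i]
--     pos_min_index = i
--     while i < len(array):
--         if 0 < array[i] < pos_min:
--             pos_min = array[i]
--             pos_min_index = i
--         i += 1
--     return pos_min_index
-- ===== SOURCE B (Python) =====
-- from typing import List, Optional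
--
-- def _get_positive_min_index(array: List[int]) -> Optional[int]:
--     if not array:
--         return None
--
--     def best(lo: int, hi: int) -> Optional[int]:
--         # argmin over positive entries of array[lo:hi]; ties/equal minima prefer the left half
--         if hi - lo == 1:
--             return lo if array[lo] > 0 else None
--         mid = (lo + hi) // 2
--         l = best(lo, mid)
--         r = best(mid, hi)
--         if l is None:
--             return r
--         if r is None:
--             return l
--         return l if array[l] <= array[r] else r
--
--     return best(0, len(array))
-- ===== Notes on version B (the rewrite author's own statement) =====
-- stated objective: alternative
-- what changed: Replaces A's fused skip-nonpositive-prefix loop plus running-min scan with a divide-and-conquer recursion that halves the index range and combines the two halves' positive-argmin results, preferring the left half on equal minima (which preserves A's first-occurrence tie-breaking).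
import Mathlib
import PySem

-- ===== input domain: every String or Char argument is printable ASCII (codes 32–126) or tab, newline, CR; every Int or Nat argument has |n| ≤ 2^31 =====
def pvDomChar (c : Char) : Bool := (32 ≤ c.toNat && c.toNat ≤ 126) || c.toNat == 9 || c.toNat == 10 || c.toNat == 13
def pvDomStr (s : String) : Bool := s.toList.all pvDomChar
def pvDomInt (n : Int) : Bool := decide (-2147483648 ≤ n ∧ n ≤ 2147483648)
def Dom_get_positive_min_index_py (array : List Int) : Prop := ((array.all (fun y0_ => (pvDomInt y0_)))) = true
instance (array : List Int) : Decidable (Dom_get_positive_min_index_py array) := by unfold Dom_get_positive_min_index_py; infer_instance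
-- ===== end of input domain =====

-- B replaces A's single fused skip-prefix + running-min scan by a divide-and-conquer
-- recursion on index halves (combine prefers the left half on ties); objective: alternative.

-- ===== PORT A =====
-- first while loop: skip the nonpositive prefix, returning None when i reaches len(array)
def pvASkip (array : List Int) (i : Nat) : Option Nat :=
  if h : i < array.length then
    if array[i] ≤ 0 then pvASkip array (i + 1) else some i
  else none
termination_by array.length - i

-- second while loop: running minimum over positives; state = (pos_min, pos_min_index)
def pvAMin (array : List Int) (i : Nat) (pm : Int) (pmi : Int) : Int × Int :=
  if h : i < array.length then
    if 0 < array[i] ∧ array[i] < pm then pvAMin array (i + 1) array[i] (i : Int)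
    else pvAMin array (i + 1) pm pmi
  else (pm, pmi)
termination_by array.length - i

def get_positive_min_index_py (array : List Int) : Option Int :=
  if array.length = 0 then none
  else
    match pvASkip array 0 with
    | none => none
    | some i => some (pvAMin array i (array.getD i 0) (i : Int)).2

-- ===== PORT B =====
-- inner def best(lo, hi): argmin over positive entries of array[lo:hi]; recursion on halves.
-- Only ever invoked with lo < hi (so the base guard 'hi ≤ lo + 1' coincides with Python's
-- 'hi - lo == 1', and every index is in range, where pyGetD is exact for array[...]).
def pvBest (array : List Int) (lo hi : Nat) : Option Int :=
  if hi ≤ lo + 1 then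
    if 0 < PySem.List.pyGetD array (lo : Int) 0 then some (lo : Int) else none
  else
    let mid := (lo + hi) / 2
    match pvBest array lo mid, pvBest array mid hi with
    | none, r => r
    | some l, none => some l
    | some l, some r =>
        if PySem.List.pyGetD array l 0 ≤ PySem.List.pyGetD array r 0 then some l else some r
termination_by hi - lo
decreasing_by all_goals omega

def get_positive_min_index_py_alt (array : List Int) : Option Int :=
  if array.length = 0 then none
  else pvBest array 0 array.length

-- ===== PRECONDITION & SPEC =====
def Spec_get_positive_min_index_py (array : List Int) (out : Option Int) : Prop := out = get_positive_min_index_py_alt array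
instance (array : List Int) (out : Option Int) : Decidable (Spec_get_positive_min_index_py array out) := by unfold Spec_get_positive_min_index_py; infer_instance

-- ===== CLAIM (what is proved, stated in full; the proofs are below) =====
def Claim_equal_get_positive_min_index_py : Prop := ∀ (array : List Int), Dom_get_positive_min_index_py array → Spec_get_positive_min_index_py array (get_positive_min_index_py array)

-- ===== LEMMAS AND PROOFS =====

-- proof-side view: the (value, index) candidates of the index range [lo, hi)
def pvCandsR (array : List Int) (lo hi : Nat) : List (Int × Int) :=
  (List.range' lo (hi - lo)).filterMap
    (fun i => if 0 < array.getD i 0 then some (array.getD i 0, (i : Int)) else none)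

-- running-minimum step / fold over an optional accumulator (none = no candidate yet)
def pvStep (o : Option (Int × Int)) (p : Int × Int) : Option (Int × Int) :=
  match o with
  | none => some p
  | some b => some (if p.1 < b.1 then p else b)

def pvMFold (l : List (Int × Int)) : Option (Int × Int) := l.foldl pvStep none

def pvOptMin (o₁ o₂ : Option (Int × Int)) : Option (Int × Int) :=
  match o₁, o₂ with
  | none, r => r
  | some l, none => some l
  | some l, some r => some (if l.1 ≤ r.1 then l else r)

-- A's second-loop fold (pair accumulator) as used by the A-side proof
def pvMinFold (l : List (Int × Int)) (c : Int × Int) : Int × Int :=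
  l.foldl (fun best p => if p.1 < best.1 then p else best) c

lemma pvFoldl_step_some (l : List (Int × Int)) (c : Int × Int) :
    l.foldl pvStep (some c) = some (pvMinFold l c) := by
  induction l generalizing c with
  | nil => rfl
  | cons p l ih => simp [pvStep, pvMinFold, ih, List.foldl_cons]

lemma pvStep_eq_optMin (o : Option (Int × Int)) (p : Int × Int) :
    pvStep o p = pvOptMin o (some p) := by
  cases o with
  | none => rfl
  | some b =>
    simp only [pvStep, pvOptMin]
    by_cases h : p.1 < b.1
    · rw [if_pos h, if_neg (by omega)]
    · rw [if_neg h, if_pos (by omega)]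

lemma pvOptMin_assoc (o₁ o₂ o₃ : Option (Int × Int)) :
    pvOptMin (pvOptMin o₁ o₂) o₃ = pvOptMin o₁ (pvOptMin o₂ o₃) := by
  cases o₁ <;> cases o₂ <;> cases o₃ <;> simp only [pvOptMin] <;> split_ifs <;>
    first | rfl | omega

lemma pvFoldl_eq_optMin (l : List (Int × Int)) (o : Option (Int × Int)) :
    l.foldl pvStep o = pvOptMin o (pvMFold l) := by
  induction l generalizing o with
  | nil => cases o <;> rfl
  | cons p l ih =>
    rw [List.foldl_cons, ih, pvStep_eq_optMin]
    have h2 : pvMFold (p :: l) = pvOptMin (some p) (pvMFold l) := by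
      show (p :: l).foldl pvStep none = _
      rw [List.foldl_cons, ih]
      rfl
    rw [h2, pvOptMin_assoc]

lemma pvMFold_append (l₁ l₂ : List (Int × Int)) :
    pvMFold (l₁ ++ l₂) = pvOptMin (pvMFold l₁) (pvMFold l₂) := by
  unfold pvMFold
  rw [List.foldl_append, pvFoldl_eq_optMin]
  rfl

lemma pvCandsR_empty (array : List Int) (lo hi : Nat) (h : hi ≤ lo) :
    pvCandsR array lo hi = [] := by
  unfold pvCandsR
  rw [Nat.sub_eq_zero_of_le h]
  rfl

lemma pvCandsR_split (array : List Int) (lo mid hi : Nat) (h₁ : lo ≤ mid) (h₂ : mid ≤ hi) :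
    pvCandsR array lo hi = pvCandsR array lo mid ++ pvCandsR array mid hi := by
  unfold pvCandsR
  rw [← List.filterMap_append]
  have : List.range' lo (mid - lo) ++ List.range' mid (hi - mid) = List.range' lo (hi - lo) := by
    have h3 := List.range'_append (s := lo) (m := mid - lo) (n := hi - mid) (step := 1)
    rw [show lo + 1 * (mid - lo) = mid by omega,
      show mid - lo + (hi - mid) = hi - lo by omega] at h3
    exact h3
  rw [this]

lemma pvCandsR_step (array : List Int) (lo hi : Nat) (h : lo < hi) :
    pvCandsR array lo hi =
      (if 0 < array.getD lo 0 then [(array.getD lo 0, (lo : Int))] else []) ++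
        pvCandsR array (lo + 1) hi := by
  unfold pvCandsR
  rw [show hi - lo = (hi - (lo + 1)) + 1 by omega, List.range'_succ, List.filterMap_cons]
  by_cases hp : 0 < array.getD lo 0 <;>
    simp only [List.getD_eq_getElem?_getD] at hp <;> simp [hp]

lemma pvCandsR_singleton (array : List Int) (lo : Nat) :
    pvCandsR array lo (lo + 1) =
      if 0 < array.getD lo 0 then [(array.getD lo 0, (lo : Int))] else [] := by
  rw [pvCandsR_step array lo (lo + 1) (by omega), pvCandsR_empty array (lo + 1) (lo + 1) le_rfl,
    List.append_nil]

-- any member of the candidate list carries its own value: p.1 = array.getD p.2.toNat 0, 0 ≤ p.2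
lemma pvCandsR_mem (array : List Int) (lo hi : Nat) (p : Int × Int)
    (h : p ∈ pvCandsR array lo hi) : p.1 = array.getD p.2.toNat 0 ∧ 0 ≤ p.2 := by
  unfold pvCandsR at h
  simp only [List.mem_filterMap] at h
  obtain ⟨i, _, hi2⟩ := h
  by_cases hp : 0 < array.getD i 0
  · rw [if_pos hp, Option.some_inj] at hi2
    subst hi2
    simp
  · rw [if_neg hp] at hi2
    exact absurd hi2 (by simp)

lemma pvMFold_mem (l : List (Int × Int)) (p : Int × Int) (h : pvMFold l = some p) : p ∈ l := by
  have key : ∀ (l : List (Int × Int)) (o : Option (Int × Int)) (p : Int × Int),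
      l.foldl pvStep o = some p → p ∈ l ∨ o = some p := by
    intro l
    induction l with
    | nil => intro o p h; exact Or.inr h
    | cons q l ih =>
      intro o p h
      rw [List.foldl_cons] at h
      rcases ih (pvStep o q) p h with h1 | h1
      · exact Or.inl (List.mem_cons_of_mem _ h1)
      · cases o with
        | none =>
          simp only [pvStep, Option.some_inj] at h1
          exact Or.inl (h1 ▸ List.mem_cons_self)
        | some b =>
          simp only [pvStep, Option.some_inj] at h1
          by_cases hb : q.1 < b.1
          · rw [if_pos hb] at h1; exact Or.inl (h1 ▸ List.mem_cons_self)
          · rw [if_neg hb] at h1; exact Or.inr (congrArg some h1)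
  rcases key l none p h with h1 | h1
  · exact h1
  · exact absurd h1 (by simp)

-- B's divide-and-conquer equals the optional min-fold of the range candidates
lemma pvBest_eq (array : List Int) : ∀ (n lo hi : Nat), hi - lo ≤ n → lo < hi →
    pvBest array lo hi = (pvMFold (pvCandsR array lo hi)).map Prod.snd := by
  intro n
  induction n with
  | zero => intro lo hi h1 h2; omega
  | succ n ih =>
    intro lo hi h1 h2
    rw [pvBest.eq_def]
    by_cases hb : hi ≤ lo + 1
    · rw [if_pos hb]
      have he : hi = lo + 1 := by omega
      subst he
      rw [pvCandsR_singleton]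
      have hpg : PySem.List.pyGetD array (lo : Int) 0 = array.getD lo 0 := by
        simp [PySem.List.pyGetD_natCast, List.getD_eq_getElem?_getD]
      rw [hpg]
      by_cases hp : 0 < array.getD lo 0
      · rw [if_pos hp, if_pos hp]; rfl
      · rw [if_neg hp, if_neg hp]; rfl
    · rw [if_neg hb]
      show (match pvBest array lo ((lo + hi) / 2), pvBest array ((lo + hi) / 2) hi with
        | none, r => r
        | some l, none => some l
        | some l, some r =>
            if PySem.List.pyGetD array l 0 ≤ PySem.List.pyGetD array r 0 then some l
            else some r) = _
      have hmid1 : lo < (lo + hi) / 2 := by omega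
      have hmid2 : (lo + hi) / 2 < hi := by omega
      have ihl := ih lo ((lo + hi) / 2) (by omega) hmid1
      have ihr := ih ((lo + hi) / 2) hi (by omega) hmid2
      rw [pvCandsR_split array lo ((lo + hi) / 2) hi (by omega) (by omega), pvMFold_append,
        ihl, ihr]
      cases hmfl : pvMFold (pvCandsR array lo ((lo + hi) / 2)) with
      | none =>
        cases hmfr : pvMFold (pvCandsR array ((lo + hi) / 2) hi) with
        | none => rfl
        | some pr => rfl
      | some pl =>
        cases hmfr : pvMFold (pvCandsR array ((lo + hi) / 2) hi) with
        | none => rfl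
        | some pr =>
          have hpl := pvCandsR_mem array lo ((lo + hi) / 2) pl (pvMFold_mem _ _ hmfl)
          have hpr := pvCandsR_mem array ((lo + hi) / 2) hi pr (pvMFold_mem _ _ hmfr)
          have hk : ∀ (k : Nat), PySem.List.pyGetD array ((k : Nat) : Int) 0 = array.getD k 0 := by
            intro k
            rw [PySem.List.pyGetD_natCast, List.getD_eq_getElem?_getD]
          have hvl : PySem.List.pyGetD array pl.2 0 = pl.1 := by
            rw [hpl.1]
            conv_lhs => rw [show pl.2 = ((pl.2.toNat : Nat) : Int) from by omega]
            exact hk pl.2.toNat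
          have hvr : PySem.List.pyGetD array pr.2 0 = pr.1 := by
            rw [hpr.1]
            conv_lhs => rw [show pr.2 = ((pr.2.toNat : Nat) : Int) from by omega]
            exact hk pr.2.toNat
          simp only [Option.map_some]
          show (if PySem.List.pyGetD array pl.2 0 ≤ PySem.List.pyGetD array pr.2 0
              then some pl.2 else some pr.2) = _
          rw [hvl, hvr]
          simp only [pvOptMin, Option.map_some]
          split_ifs <;> rfl

-- ===== A-side: the combined result of A starting at index i equals the min-fold of the suffix candidates =====
lemma pvAMin_eq_fold (array : List Int) (i : Nat) (pm : Int) (pmi : Int) :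
    pvAMin array i pm pmi = pvMinFold (pvCandsR array i array.length) (pm, pmi) := by
  fun_induction pvAMin array i pm pmi with
  | case1 i pm pmi h hc ih =>
    rw [ih, pvCandsR_step array i array.length h]
    have hg : array.getD i 0 = array[i] := by
      simp [List.getD_eq_getElem?_getD, List.getElem?_eq_getElem h]
    rw [hg, if_pos hc.1]
    simp [pvMinFold, hc.2]
  | case2 i pm pmi h hc ih =>
    rw [ih, pvCandsR_step array i array.length h]
    have hg : array.getD i 0 = array[i] := by
      simp [List.getD_eq_getElem?_getD, List.getElem?_eq_getElem h]
    rw [hg]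
    by_cases hp : 0 < array[i]
    · have hlt : ¬ array[i] < pm := fun hl => hc ⟨hp, hl⟩
      simp [hp, pvMinFold, hlt]
    · simp [hp]
  | case3 i pm pmi h =>
    rw [pvCandsR_empty array i array.length (by omega)]
    rfl

lemma pv_main (array : List Int) (i : Nat) :
    (match pvASkip array i with
      | none => none
      | some j => some (pvAMin array j (array.getD j 0) (j : Int)).2) =
    (pvMFold (pvCandsR array i array.length)).map Prod.snd := by
  fun_induction pvASkip array i with
  | case1 i h hle ih =>
    rw [ih, pvCandsR_step array i array.length h]
    have hg : array.getD i 0 = array[i] := by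
      simp [List.getD_eq_getElem?_getD, List.getElem?_eq_getElem h]
    rw [hg, if_neg (by omega : ¬ 0 < array[i])]
    rfl
  | case2 i h hpos =>
    have hp : 0 < array[i] := by omega
    rw [pvCandsR_step array i array.length h]
    have hg : array.getD i 0 = array[i] := by
      simp [List.getD_eq_getElem?_getD, List.getElem?_eq_getElem h]
    rw [hg, if_pos hp, List.singleton_append]
    show some (pvAMin array i (array.getD i 0) (i : Int)).2 = _
    rw [pvAMin_eq_fold, pvCandsR_step array i array.length h, hg, if_pos hp]
    have h1 : pvMFold ((array[i], (i : Int)) :: pvCandsR array (i + 1) array.length) =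
        some (pvMinFold (pvCandsR array (i + 1) array.length) (array[i], (i : Int))) := by
      show List.foldl pvStep (pvStep none _) _ = _
      rw [show pvStep none (array[i], (i : Int)) = some (array[i], (i : Int)) from rfl,
        pvFoldl_step_some]
    rw [h1]
    simp [pvMinFold]
  | case3 i h =>
    rw [pvCandsR_empty array i array.length (by omega)]
    rfl

-- ===== VERDICT (by name: the statement is the Claim_ definition above) =====
theorem get_positive_min_index_py_spec : Claim_equal_get_positive_min_index_py := by
  intro array _
  unfold Spec_get_positive_min_index_py get_positive_min_index_py get_positive_min_index_py_alt
  by_cases hlen : array.length = 0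
  · rw [if_pos hlen, if_pos hlen]
  ·  rw [if_neg hlen, if_neg hlen,
      pvBest_eq array array.length 0 array.length (by omega) (by omega), ← pv_main array 0]
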